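-- pv_equiv track=rewrite | github.com/Jjiggu/CodingTest | 명진/programmers/숫자 게임.py | solution
-- ===== SOURCE A (Python) =====
-- from bisect import bisect_right as br
--
-- def solution(A, B):
--     answer = 0
--     B.sort()
--     for n in A:
--         selected = br(B, n)
--         if selected < len(B):
--             del B[selected]
--             answer += 1
--     return answer
-- ===== SOURCE B (Python) =====
-- def solution(A, B):
--     # Two-pointer merge over both lists sorted; return value matches A.
--     # (Like A, this mutates B in place via B.sort(); equivalence is about the return value.)
--     B.sort()
--     A2 = sorted(A)
--     ans = 0
--     i = 0
--     j = 0
--     while i < len(A2) and j < len(B):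
--         if B[j] <= A2[i]:
--             j += 1
--         else:
--             ans += 1
--             i += 1
--             j += 1
--     return ans
-- ===== Notes on version B (the rewrite author's own statement) =====
-- stated objective: faster
-- what changed: Replaces per-element bisect+delete on the live list B with a single two-pointer merge over sorted A and sorted B (valid because the greedy match count is independent of the processing order of A).
import Mathlib
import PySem

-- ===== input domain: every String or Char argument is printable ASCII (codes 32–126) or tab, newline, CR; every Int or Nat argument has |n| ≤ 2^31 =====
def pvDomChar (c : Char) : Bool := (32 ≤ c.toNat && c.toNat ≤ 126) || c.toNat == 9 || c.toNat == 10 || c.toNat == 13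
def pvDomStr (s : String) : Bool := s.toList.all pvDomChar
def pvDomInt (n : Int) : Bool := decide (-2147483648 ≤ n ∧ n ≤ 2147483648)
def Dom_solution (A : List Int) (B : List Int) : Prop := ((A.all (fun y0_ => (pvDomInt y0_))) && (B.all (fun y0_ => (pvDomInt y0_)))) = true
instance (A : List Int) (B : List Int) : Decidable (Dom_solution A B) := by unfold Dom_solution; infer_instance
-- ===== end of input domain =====

-- B replaces A's per-element bisect+delete greedy on the live list B with a two-pointer
-- merge over sorted A and sorted B (asymptotically faster); both sort B in place in
-- Python, and A also deletes from B — the equivalence proved is about the return value.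


-- ===== PORT A =====
-- loop body of A: selected = bisect_right(B, n); if selected < len(B): del B[selected]; answer += 1
-- (bisect_right, a stdlib call, is ported as PySem.List.bisectRight)
def gstep (s : List Int × Int) (n : Int) : List Int × Int :=
  let selected := PySem.List.bisectRight s.1 n
  if selected < s.1.length then (s.1.eraseIdx selected, s.2 + 1) else s

def solution (A : List Int) (B : List Int) : Int :=
  (A.foldl gstep (PySem.List.sorted B (fun x => x) false, 0)).2

-- ===== PORT B =====
-- the while loop of Source B: indices i over sorted A, j over sorted B, become the two list arguments
def tpGo : List Int → List Int → Int
  | [], _ => 0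
  | _ :: _, [] => 0
  | a :: as, b :: bs => if b ≤ a then tpGo (a :: as) bs else 1 + tpGo as bs
termination_by x y => x.length + y.length

def solution_alt (A : List Int) (B : List Int) : Int :=
  tpGo (PySem.List.sorted A (fun x => x) false) (PySem.List.sorted B (fun x => x) false)

-- ===== PRECONDITION & SPEC =====
def Spec_solution (A : List Int) (B : List Int) (out : Int) : Prop := out = solution_alt A B
instance (A : List Int) (B : List Int) (out : Int) : Decidable (Spec_solution A B out) := by unfold Spec_solution; infer_instance

-- ===== CLAIM (what is proved, stated in full; the proofs are below) =====
def Claim_equal_solution : Prop := ∀ (A : List Int) (B : List Int), Dom_solution A B → Spec_solution A B (solution A B)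

-- ===== LEMMAS AND PROOFS =====

-- "remove the first element greater than x" with the 0/1 count it contributes
def rem (x : Int) : List Int → List Int × Int
  | [] => ([], 0)
  | b :: L => if x < b then (L, 1) else (b :: (rem x L).1, (rem x L).2)

def foldRem : List Int → List Int → List Int × Int
  | [], L => (L, 0)
  | x :: xs, L => ((foldRem xs (rem x L).1).1, (rem x L).2 + (foldRem xs (rem x L).1).2)

-- a "cut point" of a list at x is unique
theorem cut_unique (L : List Int) (x : Int) (k1 k2 : Nat)
    (h1 : k1 ≤ L.length) (h2 : k2 ≤ L.length)
    (a1 : ∀ j (hj : j < L.length), j < k1 → L[j] ≤ x)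
    (b1 : ∀ j (hj : j < L.length), k1 ≤ j → x < L[j])
    (a2 : ∀ j (hj : j < L.length), j < k2 → L[j] ≤ x)
    (b2 : ∀ j (hj : j < L.length), k2 ≤ j → x < L[j]) : k1 = k2 := by
  rcases Nat.lt_trichotomy k1 k2 with h | h | h
  · have hj : k1 < L.length := lt_of_lt_of_le h h2
    have := a2 k1 hj h
    have := b1 k1 hj (le_refl _)
    omega
  · exact h
  · have hj : k2 < L.length := lt_of_lt_of_le h h1
    have := a1 k2 hj h
    have := b2 k2 hj (le_refl _)
    omega

theorem bisect_cons_lt (b : Int) (L : List Int) (x : Int)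
    (hs : List.Pairwise (· ≤ ·) (b :: L)) (hx : x < b) :
    PySem.List.bisectRight (b :: L) x = 0 := by
  obtain ⟨hle, ha, hb⟩ := PySem.List.bisectRight_spec (b :: L) x hs
  by_contra h
  have h0 : (0:Nat) < (b :: L).length := by simp
  have := ha 0 h0 (Nat.pos_of_ne_zero h)
  simp at this
  omega

theorem bisect_cons_ge (b : Int) (L : List Int) (x : Int)
    (hs : List.Pairwise (· ≤ ·) (b :: L)) (hx : b ≤ x) :
    PySem.List.bisectRight (b :: L) x = PySem.List.bisectRight L x + 1 := by
  have hsL : List.Pairwise (· ≤ ·) L := hs.of_cons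
  obtain ⟨hle, ha, hb⟩ := PySem.List.bisectRight_spec (b :: L) x hs
  obtain ⟨hle', ha', hb'⟩ := PySem.List.bisectRight_spec L x hsL
  set k := PySem.List.bisectRight (b :: L) x with hk
  have hk0 : k ≠ 0 := by
    intro h0
    have h0' : (0:Nat) < (b :: L).length := by simp
    have := hb 0 h0' (by omega)
    simp at this
    omega
  obtain ⟨m, hm⟩ : ∃ m, k = m + 1 := ⟨k - 1, by omega⟩
  have hmlen : m ≤ L.length := by
    have := hle; simp at this; omega
  have := cut_unique L x m (PySem.List.bisectRight L x) hmlen hle'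
    (fun j hj hjm => by
      have hj' : j + 1 < (b :: L).length := by simp; omega
      have := ha (j + 1) hj' (by omega)
      simpa using this)
    (fun j hj hjm => by
      have hj' : j + 1 < (b :: L).length := by simp; omega
      have := hb (j + 1) hj' (by omega)
      simpa using this)
    ha' hb'
  omega

theorem gstep_eq_rem (L : List Int) (x : Int) (c : Int)
    (hs : List.Pairwise (· ≤ ·) L) :
    gstep (L, c) x = ((rem x L).1, c + (rem x L).2) := by
  induction L generalizing c with
  | nil =>
    obtain ⟨hle, _, _⟩ := PySem.List.bisectRight_spec [] x (by simp)
    simp at hle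
    simp [gstep, rem]
  | cons b L ih =>
    by_cases hx : x < b
    · simp only [gstep, bisect_cons_lt b L x hs hx, rem, if_pos hx]
      simp
    · have hbx : b ≤ x := by omega
      have hsL : List.Pairwise (· ≤ ·) L := hs.of_cons
      have ihL := ih c hsL
      rw [Prod.ext_iff] at ihL
      obtain ⟨ih1, ih2⟩ := ihL
      simp only [gstep] at ih1 ih2
      simp only [gstep, bisect_cons_ge b L x hs hbx, rem, if_neg hx,
        List.length_cons, Nat.add_lt_add_iff_right, List.eraseIdx_cons_succ]
      by_cases hlen : PySem.List.bisectRight L x < L.length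
      · simp only [if_pos hlen] at ih1 ih2 ⊢
        rw [Prod.ext_iff]
        constructor
        · simp [← ih1]
        · simp; omega
      · simp only [if_neg hlen] at ih1 ih2 ⊢
        rw [Prod.ext_iff]
        constructor
        · simp [← ih1]
        · simp; omega

theorem rem_sublist (x : Int) (L : List Int) : (rem x L).1.Sublist L := by
  induction L with
  | nil => simp [rem]
  | cons b L ih =>
    by_cases hx : x < b
    · simp [rem, if_pos hx]
    · simp only [rem, if_neg hx]
      exact List.Sublist.cons₂ b ih

theorem rem_sorted (x : Int) (L : List Int) (hs : List.Pairwise (· ≤ ·) L) :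
    List.Pairwise (· ≤ ·) (rem x L).1 :=
  List.Pairwise.sublist (rem_sublist x L) hs

-- when every element is greater than x, rem just drops the head
theorem rem_all_gt (x : Int) (M : List Int) (h : ∀ z ∈ M, x < z) :
    rem x M = (M.tail, if M.isEmpty then (0:Int) else 1) := by
  cases M with
  | nil => simp [rem]
  | cons b L =>
    have : x < b := h b (by simp)
    simp [rem, if_pos this]

theorem rem_comm_le (x y : Int) (hxy : x ≤ y) (L : List Int)
    (hs : List.Pairwise (· ≤ ·) L) :
    ((rem y (rem x L).1).1, (rem x L).2 + (rem y (rem x L).1).2)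
      = ((rem x (rem y L).1).1, (rem y L).2 + (rem x (rem y L).1).2) := by
  induction L with
  | nil => simp [rem]
  | cons b L ih =>
    have hsL : List.Pairwise (· ≤ ·) L := hs.of_cons
    have hball : ∀ z ∈ L, b ≤ z := (List.pairwise_cons.mp hs).1
    by_cases hyb : y < b
    · have hxb : x < b := lt_of_le_of_lt hxy hyb
      simp only [rem, if_pos hyb, if_pos hxb]
      have hLy : ∀ z ∈ L, y < z := fun z hz => lt_of_lt_of_le hyb (hball z hz)
      have hLx : ∀ z ∈ L, x < z := fun z hz => lt_of_le_of_lt hxy (hLy z hz)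
      rw [rem_all_gt x L hLx, rem_all_gt y L hLy]
    · by_cases hxb : x < b
      · -- x removes the head b; y keeps it
        simp only [rem, if_pos hxb, if_neg hyb]
        rw [Prod.ext_iff]
        exact ⟨rfl, by omega⟩
      · -- both keep the head b
        simp only [rem, if_neg hyb, if_neg hxb]
        have hc := ih hsL
        rw [Prod.ext_iff] at hc
        obtain ⟨h1, h2⟩ := hc
        simp only at h1 h2
        rw [Prod.ext_iff]
        constructor
        · simp [h1]
        · simp; omega

theorem rem_comm (x y : Int) (L : List Int) (hs : List.Pairwise (· ≤ ·) L) :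
    ((rem y (rem x L).1).1, (rem x L).2 + (rem y (rem x L).1).2)
      = ((rem x (rem y L).1).1, (rem y L).2 + (rem x (rem y L).1).2) := by
  rcases le_total x y with h | h
  · exact rem_comm_le x y h L hs
  · exact (rem_comm_le y x h L hs).symm

theorem foldRem_perm (A1 A2 : List Int) (hp : A1.Perm A2) :
    ∀ L, List.Pairwise (· ≤ ·) L → foldRem A1 L = foldRem A2 L := by
  induction hp with
  | nil => intro L _; rfl
  | cons x _ ih =>
    intro L hs
    simp only [foldRem]
    rw [ih (rem x L).1 (rem_sorted x L hs)]
  | swap x y l =>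
    intro L hs
    simp only [foldRem]
    have hc := rem_comm y x L hs
    rw [Prod.ext_iff] at hc
    obtain ⟨h1, h2⟩ := hc
    simp only at h1 h2
    rw [h1]
    rw [Prod.ext_iff]
    refine ⟨rfl, ?_⟩
    simp only
    omega
  | trans h12 h23 ih1 ih2 =>
    intro L hs
    rw [ih1 L hs, ih2 L hs]

theorem foldl_gstep_eq (A : List Int) (L : List Int) (c : Int)
    (hs : List.Pairwise (· ≤ ·) L) :
    A.foldl gstep (L, c) = ((foldRem A L).1, c + (foldRem A L).2) := by
  induction A generalizing L c with
  | nil => simp [foldRem]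
  | cons x xs ih =>
    simp only [List.foldl_cons, foldRem]
    rw [gstep_eq_rem L x c hs, ih (rem x L).1 (c + (rem x L).2) (rem_sorted x L hs)]
    rw [Prod.ext_iff]
    refine ⟨rfl, ?_⟩
    simp only
    omega

theorem foldRem_nil_right (xs : List Int) : foldRem xs [] = ([], 0) := by
  induction xs with
  | nil => rfl
  | cons x xs ih => simp [foldRem, rem, ih]

-- a head that no remaining query exceeds is inert
theorem foldRem_head_inert (xs : List Int) (b : Int) (M : List Int)
    (h : ∀ z ∈ xs, b ≤ z) :
    foldRem xs (b :: M) = (b :: (foldRem xs M).1, (foldRem xs M).2) := by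
  induction xs generalizing M with
  | nil => rfl
  | cons x xs ih =>
    have hbx : b ≤ x := h x (by simp)
    simp only [foldRem, rem, if_neg (by omega : ¬ x < b)]
    rw [ih (rem x M).1 (fun z hz => h z (by simp [hz]))]

theorem foldRem_cons_eq_tpGo (a : Int) (as : List Int)
    (IH : ∀ L, List.Pairwise (· ≤ ·) L → (foldRem as L).2 = tpGo as L)
    (hAall : ∀ z ∈ as, a ≤ z) :
    ∀ L, List.Pairwise (· ≤ ·) L → (foldRem (a :: as) L).2 = tpGo (a :: as) L := by
  intro L
  induction L with
  | nil =>
    intro _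
    simp [foldRem, rem, foldRem_nil_right, tpGo]
  | cons b L' ihL =>
    intro hL
    have hL' : List.Pairwise (· ≤ ·) L' := hL.of_cons
    by_cases hab : b ≤ a
    · simp only [foldRem, rem, if_neg (by omega : ¬ a < b)]
      rw [foldRem_head_inert as b (rem a L').1 (fun z hz => le_trans hab (hAall z hz))]
      have htp : tpGo (a :: as) (b :: L') = tpGo (a :: as) L' := by
        simp [tpGo, if_pos hab]
      rw [htp]
      have := ihL hL'
      simp only [foldRem] at this
      exact this
    · simp only [foldRem, rem, if_pos (by omega : a < b)]
      have htp : tpGo (a :: as) (b :: L') = 1 + tpGo as L' := by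
        simp [tpGo, if_neg hab]
      rw [htp, IH L' hL']

theorem foldRem_eq_tpGo (A : List Int) :
    List.Pairwise (· ≤ ·) A →
    ∀ L, List.Pairwise (· ≤ ·) L → (foldRem A L).2 = tpGo A L := by
  induction A with
  | nil => intro _ L _; simp [foldRem, tpGo]
  | cons a as ih =>
    intro hA
    exact foldRem_cons_eq_tpGo a as (ih hA.of_cons) (List.pairwise_cons.mp hA).1

-- ===== VERDICT (by name: the statement is the Claim_ definition above) =====
theorem solution_spec : Claim_equal_solution := by
  intro A B _
  unfold Spec_solution solution solution_alt
  have hsB : List.Pairwise (· ≤ ·) (PySem.List.sorted B (fun x => x) false) := by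
    simpa using PySem.List.sorted_pairwise B (fun x => x)
  have hsA : List.Pairwise (· ≤ ·) (PySem.List.sorted A (fun x => x) false) := by
    simpa using PySem.List.sorted_pairwise A (fun x => x)
  have hperm : A.Perm (PySem.List.sorted A (fun x => x) false) :=
    (PySem.List.sorted_perm A (fun x => x) false).symm
  rw [foldl_gstep_eq A _ 0 hsB]
  simp only
  rw [foldRem_perm A _ hperm _ hsB]
  rw [foldRem_eq_tpGo _ hsA _ hsB]
  simp
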